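-- pv_equiv track=rewrite | github.com/ChangKuoman/Mentoria-CS1111-2021-2 | extraPC3/extraPC3.05.py | es_diagonal
-- ===== SOURCE A (Python) =====
-- def es_diagonal(matriz, f, c):
--     suma_diagonal = 0
--     suma_resto = 0
--     for i in range(f):
--         for j in range(c):
--             if i==j:
--                 suma_diagonal += matriz[i][j]
--             else:
--                 suma_resto += matriz[i][j]
--
--     if suma_diagonal > suma_resto:
--         return 1
--     else:
--         return -1
-- ===== SOURCE B (Python) =====
-- def es_diagonal(matriz, f, c):
--     suma_diagonal = sum(matriz[i][i] for i in range(min(f, c)))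
--     suma_resto = sum(matriz[i][j] for i in range(f) for j in range(c) if i != j)
--     return 1 if suma_diagonal > suma_resto else -1
-- ===== Notes on version B (the rewrite author's own statement) =====
-- stated objective: simpler
-- what changed: Replaced the single nested loop with an i==j branch by two independent comprehensions: a direct one-index pass over the diagonal (range(min(f,c))) and a filtered full scan for the rest, then one conditional expression.
import Mathlib
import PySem

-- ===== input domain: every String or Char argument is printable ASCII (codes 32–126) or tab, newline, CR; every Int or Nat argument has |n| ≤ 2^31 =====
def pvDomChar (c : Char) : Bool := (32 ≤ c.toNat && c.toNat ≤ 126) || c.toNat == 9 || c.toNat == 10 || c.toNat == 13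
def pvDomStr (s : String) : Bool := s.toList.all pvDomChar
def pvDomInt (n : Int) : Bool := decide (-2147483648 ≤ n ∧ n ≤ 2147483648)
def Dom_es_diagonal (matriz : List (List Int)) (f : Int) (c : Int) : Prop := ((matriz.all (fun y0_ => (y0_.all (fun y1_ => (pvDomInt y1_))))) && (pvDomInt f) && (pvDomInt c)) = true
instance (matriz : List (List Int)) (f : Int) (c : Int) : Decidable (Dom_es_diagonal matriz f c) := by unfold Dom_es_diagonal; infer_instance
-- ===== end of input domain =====

-- B replaces A's single branching nested loop by two independent passes (a direct
-- diagonal pass over range(min(f,c)) and a filtered full scan for the rest); objective: simpler.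

-- ===== PORT A =====
def es_diagonal (matriz : List (List Int)) (f : Int) (c : Int) : Int :=
  let st := (PySem.List.pyRange 0 f 1).foldl (fun s i =>
    (PySem.List.pyRange 0 c 1).foldl (fun s j =>
      if i = j then
        (s.1 + PySem.List.pyGetD (PySem.List.pyGetD matriz i []) j 0, s.2)
      else
        (s.1, s.2 + PySem.List.pyGetD (PySem.List.pyGetD matriz i []) j 0)) s) ((0 : Int), (0 : Int))
  if st.1 > st.2 then 1 else -1

-- ===== PORT B =====
def es_diagonal_alt (matriz : List (List Int)) (f : Int) (c : Int) : Int :=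
  let suma_diagonal := ((PySem.List.pyRange 0 (min f c) 1).map (fun i =>
    PySem.List.pyGetD (PySem.List.pyGetD matriz i []) i 0)).sum
  let suma_resto := ((PySem.List.pyRange 0 f 1).flatMap (fun i =>
    ((PySem.List.pyRange 0 c 1).filter (fun j => decide (i ≠ j))).map (fun j =>
      PySem.List.pyGetD (PySem.List.pyGetD matriz i []) j 0))).sum
  if suma_diagonal > suma_resto then 1 else -1

-- ===== PRECONDITION & SPEC =====
-- Pre_ excludes exactly the inputs where Python A raises IndexError: when both loops
-- run (0 < f and 0 < c), the first f rows must exist and each have at least c columns.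
def Pre_es_diagonal (matriz : List (List Int)) (f : Int) (c : Int) : Prop :=
  0 < f → 0 < c → (f ≤ (matriz.length : Int) ∧ ∀ row ∈ matriz.take f.toNat, c ≤ (row.length : Int))
instance (matriz : List (List Int)) (f : Int) (c : Int) : Decidable (Pre_es_diagonal matriz f c) := by unfold Pre_es_diagonal; infer_instance

def pvWitness_es_diagonal : List (List Int) × Int × Int := ([[5, 1], [0, 2]], 2, 2)

def Spec_es_diagonal (matriz : List (List Int)) (f : Int) (c : Int) (out : Int) : Prop := out = es_diagonal_alt matriz f c
instance (matriz : List (List Int)) (f : Int) (c : Int) (out : Int) : Decidable (Spec_es_diagonal matriz f c out) := by unfold Spec_es_diagonal; infer_instance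

-- ===== CLAIM (what is proved, stated in full; the proofs are below) =====
def Claim_equal_es_diagonal : Prop := ∀ (matriz : List (List Int)) (f : Int) (c : Int), Dom_es_diagonal matriz f c → Pre_es_diagonal matriz f c → Spec_es_diagonal matriz f c (es_diagonal matriz f c)

-- ===== LEMMAS AND PROOFS =====

-- map with an if-else-0 body sums to the filtered mapped sum
theorem sum_map_ite_zero {α : Type} (l : List α) (p : α → Prop) [DecidablePred p] (g : α → Int) :
    (l.map (fun x => if p x then g x else 0)).sum
      = ((l.filter (fun x => decide (p x))).map g).sum := by
  induction l with
  | nil => rfl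
  | cons x t ih =>
    by_cases h : p x <;> simp [h, ih]

-- the diagonal pick-out: summing "if i = j then m j else 0" over range(c) for 0 ≤ i
theorem sum_map_diag (i c : Int) (hi : 0 ≤ i) (m : Int → Int) :
    ((PySem.List.pyRange 0 c 1).map (fun j => if i = j then m j else 0)).sum
      = if i < c then m i else 0 := by
  have hsum : ∀ l : List Int, l.Nodup →
      (l.map (fun j => if i = j then m j else 0)).sum = if i ∈ l then m i else 0 := by
    intro l hl
    induction l with
    | nil => simp
    | cons x t ih =>
      rcases List.nodup_cons.mp hl with ⟨hx, ht⟩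
      by_cases h : i = x
      · subst h; simp [hx, ih ht]
      · simp [h, ih ht]
  rw [hsum _ (PySem.List.nodup_pyRange_one 0 c)]
  by_cases h : i < c <;> simp [PySem.List.mem_pyRange_one, h, hi]

theorem es_diagonal_eq_alt (matriz : List (List Int)) (f : Int) (c : Int) :
    es_diagonal matriz f c = es_diagonal_alt matriz f c := by
  unfold es_diagonal es_diagonal_alt
  set m : Int → Int → Int := fun i j => PySem.List.pyGetD (PySem.List.pyGetD matriz i []) j 0 with hm
  -- rewrite A's inner loop as two independent accumulations
  have step : ∀ (i : Int) (s : Int × Int),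
      (PySem.List.pyRange 0 c 1).foldl (fun s j =>
        if i = j then (s.1 + m i j, s.2) else (s.1, s.2 + m i j)) s
      = (s.1 + ((PySem.List.pyRange 0 c 1).map (fun j => if i = j then m i j else 0)).sum,
         s.2 + ((PySem.List.pyRange 0 c 1).map (fun j => if i = j then 0 else m i j)).sum) := by
    intro i s
    have hfun : (fun (s : Int × Int) j =>
        if i = j then (s.1 + m i j, s.2) else (s.1, s.2 + m i j))
        = (fun (s : Int × Int) j =>
        (s.1 + (if i = j then m i j else 0), s.2 + (if i = j then 0 else m i j))) := by
      funext s j; by_cases h : i = j <;> simp [h]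
    rw [hfun]
    rw [PySem.List.foldl_prod_mk (f := fun a j => a + (if i = j then m i j else 0))
        (g := fun b j => b + (if i = j then 0 else m i j)) _ s.1 s.2]
    rw [PySem.List.foldl_add, PySem.List.foldl_add]
  have houter :
      (PySem.List.pyRange 0 f 1).foldl (fun s i =>
        (PySem.List.pyRange 0 c 1).foldl (fun s j =>
          if i = j then (s.1 + m i j, s.2) else (s.1, s.2 + m i j)) s) ((0 : Int), (0 : Int))
      = (((PySem.List.pyRange 0 f 1).map (fun i =>
            ((PySem.List.pyRange 0 c 1).map (fun j => if i = j then m i j else 0)).sum)).sum,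
         ((PySem.List.pyRange 0 f 1).map (fun i =>
            ((PySem.List.pyRange 0 c 1).map (fun j => if i = j then 0 else m i j)).sum)).sum) := by
    have hcongr :
        (PySem.List.pyRange 0 f 1).foldl (fun s i =>
          (PySem.List.pyRange 0 c 1).foldl (fun s j =>
            if i = j then (s.1 + m i j, s.2) else (s.1, s.2 + m i j)) s) ((0 : Int), (0 : Int))
        = (PySem.List.pyRange 0 f 1).foldl (fun (s : Int × Int) i =>
            (s.1 + ((PySem.List.pyRange 0 c 1).map (fun j => if i = j then m i j else 0)).sum,
             s.2 + ((PySem.List.pyRange 0 c 1).map (fun j => if i = j then 0 else m i j)).sum))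
            ((0 : Int), (0 : Int)) :=
      PySem.List.foldl_congr_mem _ _ _ _ (fun acc x _ => step x acc)
    rw [hcongr]
    rw [PySem.List.foldl_prod_mk
        (f := fun a i => a + ((PySem.List.pyRange 0 c 1).map (fun j => if i = j then m i j else 0)).sum)
        (g := fun b i => b + ((PySem.List.pyRange 0 c 1).map (fun j => if i = j then 0 else m i j)).sum)]
    rw [PySem.List.foldl_add, PySem.List.foldl_add]
    simp
  rw [houter]
  -- diagonal sum: A's picked-out terms equal B's pass over range(min f c)
  have hdiag : ((PySem.List.pyRange 0 f 1).map (fun i =>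
        ((PySem.List.pyRange 0 c 1).map (fun j => if i = j then m i j else 0)).sum)).sum
      = ((PySem.List.pyRange 0 (min f c) 1).map (fun i => m i i)).sum := by
    have h1 : ((PySem.List.pyRange 0 f 1).map (fun i =>
        ((PySem.List.pyRange 0 c 1).map (fun j => if i = j then m i j else 0)).sum)).sum
        = ((PySem.List.pyRange 0 f 1).map (fun i => if i < c then m i i else 0)).sum := by
      refine congrArg List.sum (List.map_congr_left ?_)
      intro i hi
      exact sum_map_diag i c (PySem.List.mem_pyRange_one.mp hi).1 (m i)
    rw [h1]
    by_cases hf : 0 < f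
    · by_cases hc : 0 < c
      · have hmin0 : (0:Int) ≤ min f c := le_min hf.le hc.le
        have hminf : min f c ≤ f := min_le_left f c
        rw [PySem.List.pyRange_one_append 0 (min f c) f hmin0 hminf]
        rw [List.map_append, List.sum_append]
        have hl : ∀ i ∈ PySem.List.pyRange 0 (min f c) 1,
            (if i < c then m i i else 0) = m i i := by
          intro i hi
          have h2 := (PySem.List.mem_pyRange_one.mp hi).2
          simp [lt_of_lt_of_le h2 (min_le_right f c)]
        have hr : ∀ i ∈ PySem.List.pyRange (min f c) f 1,
            (if i < c then m i i else 0) = 0 := by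
          intro i hi
          have h1' := (PySem.List.mem_pyRange_one.mp hi).1
          have h2' := (PySem.List.mem_pyRange_one.mp hi).2
          have hnc : ¬ i < c := by
            rcases min_choice f c with he | he <;> rw [he] at h1' <;> omega
          simp [hnc]
        rw [List.map_congr_left hl, List.map_congr_left hr]
        simp
      · have hmin : min f c ≤ 0 := le_trans (min_le_right f c) (by omega)
        rw [PySem.List.pyRange_one_eq_nil hmin]
        have hz : ∀ i ∈ PySem.List.pyRange 0 f 1, (if i < c then m i i else 0) = 0 := by
          intro i hi
          have h0 := (PySem.List.mem_pyRange_one.mp hi).1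
          have hnc : ¬ i < c := by omega
          simp [hnc]
        rw [List.map_congr_left hz]
        simp
    · have hf' : f ≤ 0 := by omega
      rw [PySem.List.pyRange_one_eq_nil hf',
          PySem.List.pyRange_one_eq_nil (le_trans (min_le_left f c) hf')]
      rfl
  -- rest sum: A's if-else-0 terms equal B's filtered flat scan
  have hrest : ((PySem.List.pyRange 0 f 1).map (fun i =>
        ((PySem.List.pyRange 0 c 1).map (fun j => if i = j then 0 else m i j)).sum)).sum
      = ((PySem.List.pyRange 0 f 1).flatMap (fun i =>
        ((PySem.List.pyRange 0 c 1).filter (fun j => decide (i ≠ j))).map (fun j => m i j))).sum := by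
    have h1 : ∀ i ∈ PySem.List.pyRange 0 f 1,
        ((PySem.List.pyRange 0 c 1).map (fun j => if i = j then 0 else m i j)).sum
        = (((PySem.List.pyRange 0 c 1).filter (fun j => decide (i ≠ j))).map (fun j => m i j)).sum := by
      intro i _
      have he : (fun j => if i = j then (0:Int) else m i j)
          = (fun j => if i ≠ j then m i j else 0) := by
        funext j; by_cases h : i = j <;> simp [h]
      rw [he, sum_map_ite_zero]
    rw [congrArg List.sum (List.map_congr_left h1)]
    rw [List.flatMap_def, List.sum_flatten, List.map_map]
    rfl
  rw [hdiag, hrest]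

-- ===== VERDICT (by name: the statement is the Claim_ definition above) =====
theorem es_diagonal_spec : Claim_equal_es_diagonal := by
  intro matriz f c _ _
  unfold Spec_es_diagonal
  exact es_diagonal_eq_alt matriz f c
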